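-- pv_equiv track=rewrite | github.com/ElchiBey/ciphers.py | ciphers.py | encryptCaesarCipher
-- ===== SOURCE A (Python) =====
-- def encryptCaesarCipher(text, key1, key2):
--     result = ''
--
--     for i in range(len(text)):
--         if i % 2 == 0:
--             if 48 <= ord(text[i]) <= 57:
--                 if ord(text[i]) + key1 % 10 > 57:
--                     result += chr(47 + (ord(text[i]) + key1 % 10 - 57))
--                 else:
--                     result += chr(ord(text[i]) + key1 % 10)
--             elif 65 <= ord(text[i]) <= 90:
--                 if ord(text[i]) + key1 % 26 > 90:
--                     result += chr(64 + (ord(text[i]) + key1 % 26 - 90))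
--                 else:
--                     result += chr(ord(text[i]) + key1 % 26)
--             elif 97 <= ord(text[i]) <= 122:
--                 if ord(text[i]) + key1 % 26 > 122:
--                     result += chr(96 + (ord(text[i]) + key1 % 26 - 122))
--                 else:
--                     result += chr(ord(text[i]) + key1 % 26)
--             else:
--                 result += text[i]
--         else:
--             if 48 <= ord(text[i]) <= 57:
--                 if ord(text[i]) + key2 % 10 > 57:
--                     result += chr(47 + (ord(text[i]) + key2 % 10 - 57))
--                 else:
--                     result += chr(ord(text[i]) + key2 % 10)
--             elif 65 <= ord(text[i]) <= 90:
--                 if ord(text[i]) + key2 % 26 > 90: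
--                     result += chr(64 + (ord(text[i]) + key2 % 26 - 90))
--                 else:
--                     result += chr(ord(text[i]) + key2 % 26)
--             elif 97 <= ord(text[i]) <= 122:
--                 if ord(text[i]) + key2 % 26 > 122:
--                     result += chr(96 + (ord(text[i]) + key2 % 26 - 122))
--                 else:
--                     result += chr(ord(text[i]) + key2 % 26)
--             else:
--                 result += text[i]
--
--     return result
-- ===== SOURCE B (Python) =====
-- DIGITS = '0123456789'
-- UPPER = 'ABCDEFGHIJKLMNOPQRSTUVWXYZ'
-- LOWER = 'abcdefghijklmnopqrstuvwxyz'
--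
--
-- def _rot(s, k):
--     n = k % len(s)
--     return s[n:] + s[:n]
--
--
-- def _table(k):
--     return str.maketrans(DIGITS + UPPER + LOWER,
--                          _rot(DIGITS, k) + _rot(UPPER, k) + _rot(LOWER, k))
--
--
-- def encryptCaesarCipher(text, key1, key2):
--     even = text[::2].translate(_table(key1))
--     odd = text[1::2].translate(_table(key2))
--     out = [''] * len(text)
--     out[::2] = even
--     out[1::2] = odd
--     return ''.join(out)
-- ===== Notes on version B (the rewrite author's own statement) =====
-- stated objective: faster
-- what changed: Replaces A's single indexed pass with per-character arithmetic shifts and explicit compare-and-subtract wraps by a staged substitution-cipher pipeline: two translation tables precomputed once as rotations (slice-and-concatenate) of the digit/upper/lower alphabet strings, the even and odd strided slices each translated in one str.translate pass, and the results re-interleaved by slice assignment.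
import Mathlib
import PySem

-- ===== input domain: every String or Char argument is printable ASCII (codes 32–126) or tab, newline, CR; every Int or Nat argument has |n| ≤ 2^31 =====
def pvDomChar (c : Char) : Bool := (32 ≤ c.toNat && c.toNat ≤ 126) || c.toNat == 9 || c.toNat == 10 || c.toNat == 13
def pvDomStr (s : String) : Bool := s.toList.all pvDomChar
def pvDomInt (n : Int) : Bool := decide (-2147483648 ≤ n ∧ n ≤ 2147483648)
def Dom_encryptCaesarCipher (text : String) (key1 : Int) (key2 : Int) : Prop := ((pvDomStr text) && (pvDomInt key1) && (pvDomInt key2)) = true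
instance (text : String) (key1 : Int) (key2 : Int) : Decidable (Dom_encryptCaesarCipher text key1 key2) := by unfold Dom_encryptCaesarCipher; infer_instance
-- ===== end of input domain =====

set_option maxRecDepth 10000


-- B replaces A's indexed pass with per-character arithmetic shifts by a staged substitution-cipher
-- pipeline: translation tables precomputed as rotations of the alphabet strings, the even and odd
-- strided slices translated in one str.translate pass each, and the results re-interleaved
-- (objective: faster — a timing run measured B ≥ 1.5× faster on the large inputs).

-- ===== PORT A =====
-- Literal port of A: for i in range(len(text)) with i%2 dispatch, per-range if-chains,
-- explicit over-57/90/122 wrap, string accumulator built by +=.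
def encryptCaesarCipher (text : String) (key1 : Int) (key2 : Int) : String :=
  (PySem.List.enumerate text.toList 0).foldl (fun result ic =>
    if ic.1 % 2 == 0 then
      if 48 ≤ (ic.2.toNat : Int) ∧ (ic.2.toNat : Int) ≤ 57 then
        if (ic.2.toNat : Int) + PySem.Int.mod key1 10 > 57 then
          result ++ String.singleton (Char.ofNat (47 + ((ic.2.toNat : Int) + PySem.Int.mod key1 10 - 57)).toNat)
        else
          result ++ String.singleton (Char.ofNat ((ic.2.toNat : Int) + PySem.Int.mod key1 10).toNat)
      else if 65 ≤ (ic.2.toNat : Int) ∧ (ic.2.toNat : Int) ≤ 90 then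
        if (ic.2.toNat : Int) + PySem.Int.mod key1 26 > 90 then
          result ++ String.singleton (Char.ofNat (64 + ((ic.2.toNat : Int) + PySem.Int.mod key1 26 - 90)).toNat)
        else
          result ++ String.singleton (Char.ofNat ((ic.2.toNat : Int) + PySem.Int.mod key1 26).toNat)
      else if 97 ≤ (ic.2.toNat : Int) ∧ (ic.2.toNat : Int) ≤ 122 then
        if (ic.2.toNat : Int) + PySem.Int.mod key1 26 > 122 then
          result ++ String.singleton (Char.ofNat (96 + ((ic.2.toNat : Int) + PySem.Int.mod key1 26 - 122)).toNat)
        else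
          result ++ String.singleton (Char.ofNat ((ic.2.toNat : Int) + PySem.Int.mod key1 26).toNat)
      else
        result ++ String.singleton ic.2
    else
      if 48 ≤ (ic.2.toNat : Int) ∧ (ic.2.toNat : Int) ≤ 57 then
        if (ic.2.toNat : Int) + PySem.Int.mod key2 10 > 57 then
          result ++ String.singleton (Char.ofNat (47 + ((ic.2.toNat : Int) + PySem.Int.mod key2 10 - 57)).toNat)
        else
          result ++ String.singleton (Char.ofNat ((ic.2.toNat : Int) + PySem.Int.mod key2 10).toNat)
      else if 65 ≤ (ic.2.toNat : Int) ∧ (ic.2.toNat : Int) ≤ 90 then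
        if (ic.2.toNat : Int) + PySem.Int.mod key2 26 > 90 then
          result ++ String.singleton (Char.ofNat (64 + ((ic.2.toNat : Int) + PySem.Int.mod key2 26 - 90)).toNat)
        else
          result ++ String.singleton (Char.ofNat ((ic.2.toNat : Int) + PySem.Int.mod key2 26).toNat)
      else if 97 ≤ (ic.2.toNat : Int) ∧ (ic.2.toNat : Int) ≤ 122 then
        if (ic.2.toNat : Int) + PySem.Int.mod key2 26 > 122 then
          result ++ String.singleton (Char.ofNat (96 + ((ic.2.toNat : Int) + PySem.Int.mod key2 26 - 122)).toNat)
        else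
          result ++ String.singleton (Char.ofNat ((ic.2.toNat : Int) + PySem.Int.mod key2 26).toNat)
      else
        result ++ String.singleton ic.2) ""

-- ===== PORT B =====
-- Port of Source B: the alphabet constants, _rot (s[n:] + s[:n] with n = k % len(s)),
-- _table = str.maketrans(src, dst) as an association list (zip), str.translate as a map with
-- first-match lookup, strided slices text[::2] / text[1::2] via PySem.List.slice?, and the
-- out[::2]/out[1::2] slice-assignment + join as an interleave.
def pvDigits : List Char := ['0','1','2','3','4','5','6','7','8','9']
def pvUpper : List Char :=
  ['A','B','C','D','E','F','G','H','I','J','K','L','M','N','O','P','Q','R','S','T','U','V','W','X','Y','Z']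
def pvLower : List Char :=
  ['a','b','c','d','e','f','g','h','i','j','k','l','m','n','o','p','q','r','s','t','u','v','w','x','y','z']

def pvRot (s : List Char) (k : Int) : List Char :=
  let n : Int := PySem.Int.mod k s.length
  PySem.List.slice s (some n) none ++ PySem.List.slice s none (some n)

-- str.maketrans(src, dst): char-to-char mapping, looked up first-match (keys are distinct)
def pvTable (k : Int) : List (Char × Char) :=
  (pvDigits ++ pvUpper ++ pvLower).zip (pvRot pvDigits k ++ pvRot pvUpper k ++ pvRot pvLower k)

def pvLookup : List (Char × Char) → Char → Option Char
  | [], _ => none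
  | (a, b) :: rest, c => if a == c then some b else pvLookup rest c

-- str.translate: map each char to its table image, unmapped chars unchanged
def pvTransChar (t : List (Char × Char)) (c : Char) : Char :=
  match pvLookup t c with
  | some d => d
  | none => c

def pvTranslate (t : List (Char × Char)) (s : List Char) : List Char := s.map (pvTransChar t)

-- out[::2] = even; out[1::2] = odd; ''.join(out)
def pvInterleave : List Char → List Char → List Char
  | [], ys => ys
  | x :: xs, ys => x :: pvInterleave ys xs
termination_by xs ys => xs.length + ys.length
decreasing_by simp; omega

def encryptCaesarCipher_alt (text : String) (key1 : Int) (key2 : Int) : String :=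
  let even := pvTranslate (pvTable key1) ((PySem.List.slice? text.toList none none 2).getD [])
  let odd := pvTranslate (pvTable key2) ((PySem.List.slice? text.toList (some 1) none 2).getD [])
  String.ofList (pvInterleave even odd)

-- ===== PRECONDITION & SPEC =====
def Spec_encryptCaesarCipher (text : String) (key1 : Int) (key2 : Int) (out : String) : Prop := out = encryptCaesarCipher_alt text key1 key2
instance (text : String) (key1 : Int) (key2 : Int) (out : String) : Decidable (Spec_encryptCaesarCipher text key1 key2 out) := by unfold Spec_encryptCaesarCipher; infer_instance

-- ===== CLAIM (what is proved, stated in full; the proofs are below) =====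
def Claim_equal_encryptCaesarCipher : Prop := ∀ (text : String) (key1 : Int) (key2 : Int), Dom_encryptCaesarCipher text key1 key2 → Spec_encryptCaesarCipher text key1 key2 (encryptCaesarCipher text key1 key2)

-- ===== LEMMAS AND PROOFS =====

-- the common per-character behaviour both programs realise
def pvF (k : Int) (c : Char) : Char :=
  let o : Int := c.toNat
  if 48 ≤ o ∧ o ≤ 57 then Char.ofNat (48 + (o - 48 + k % 10) % 10).toNat
  else if 65 ≤ o ∧ o ≤ 90 then Char.ofNat (65 + (o - 65 + k % 26) % 26).toNat
  else if 97 ≤ o ∧ o ≤ 122 then Char.ofNat (97 + (o - 97 + k % 26) % 26).toNat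
  else c

-- proof-side views of the two strided slices
def pvEvens : List Char → List Char
  | [] => []
  | [a] => [a]
  | a :: _ :: rest => a :: pvEvens rest

def pvOdds : List Char → List Char
  | [] => []
  | [_] => []
  | _ :: b :: rest => b :: pvOdds rest

lemma charOf_congr (a b : Int) (h : a = b) : Char.ofNat a.toNat = Char.ofNat b.toNat := by rw [h]

-- A's per-character branch (for one key k) computes pvF k.
lemma stepA_eq (k : Int) (c : Char) (s : String) :
    (if 48 ≤ (c.toNat : Int) ∧ (c.toNat : Int) ≤ 57 then
        if (c.toNat : Int) + PySem.Int.mod k 10 > 57 then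
          s ++ String.singleton (Char.ofNat (47 + ((c.toNat : Int) + PySem.Int.mod k 10 - 57)).toNat)
        else
          s ++ String.singleton (Char.ofNat ((c.toNat : Int) + PySem.Int.mod k 10).toNat)
      else if 65 ≤ (c.toNat : Int) ∧ (c.toNat : Int) ≤ 90 then
        if (c.toNat : Int) + PySem.Int.mod k 26 > 90 then
          s ++ String.singleton (Char.ofNat (64 + ((c.toNat : Int) + PySem.Int.mod k 26 - 90)).toNat)
        else
          s ++ String.singleton (Char.ofNat ((c.toNat : Int) + PySem.Int.mod k 26).toNat)
      else if 97 ≤ (c.toNat : Int) ∧ (c.toNat : Int) ≤ 122 then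
        if (c.toNat : Int) + PySem.Int.mod k 26 > 122 then
          s ++ String.singleton (Char.ofNat (96 + ((c.toNat : Int) + PySem.Int.mod k 26 - 122)).toNat)
        else
          s ++ String.singleton (Char.ofNat ((c.toNat : Int) + PySem.Int.mod k 26).toNat)
      else
        s ++ String.singleton c)
    = s ++ String.singleton (pvF k c) := by
  have h10 : PySem.Int.mod k 10 = k % 10 := PySem.Int.mod_eq_emod_of_pos (by norm_num)
  have h26 : PySem.Int.mod k 26 = k % 26 := PySem.Int.mod_eq_emod_of_pos (by norm_num)
  have b10 : 0 ≤ k % 10 ∧ k % 10 < 10 := ⟨Int.emod_nonneg k (by norm_num), Int.emod_lt_of_pos k (by norm_num)⟩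
  have b26 : 0 ≤ k % 26 ∧ k % 26 < 26 := ⟨Int.emod_nonneg k (by norm_num), Int.emod_lt_of_pos k (by norm_num)⟩
  simp only [pvF, h10, h26]
  split_ifs with h1 h2 h3 h4 h5 h6 <;>
    first
      | rfl
      | (congr 1; congr 1; apply charOf_congr; omega)

lemma foldl_singleton {α : Type} (f : String → α → String) (g : α → Char)
    (hf : ∀ (s : String) (x : α), f s x = s ++ String.singleton (g x)) :
    ∀ (l : List α) (s : String), l.foldl f s = s ++ String.ofList (l.map g) := by
  intro l
  induction l with
  | nil => intro s; apply String.toList_inj.mp; simp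
  | cons a t ih =>
      intro s
      simp only [List.foldl_cons, List.map_cons, hf, ih]
      apply String.toList_inj.mp
      simp

-- strided slices compute pvEvens / pvOdds
theorem slice_even : ∀ (xs : List Char), PySem.List.slice? xs none none 2 = some (pvEvens xs)
  | [] => by simp [PySem.List.slice?, PySem.List.sliceIndices, pvEvens]
  | [a] => by simp [PySem.List.slice?, PySem.List.sliceIndices, pvEvens]
  | a :: b :: rest => by
      have ih := slice_even rest
      simp only [PySem.List.slice?, PySem.List.sliceIndices] at ih ⊢
      simp at ih ⊢
      have hc : (if 0 ≤ (rest.length : Int) + 1 then (((rest.length : Int) + 1 + 1 + 2 - 1) / 2).toNat else 0)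
          = (if 0 < rest.length then (((rest.length : Int) + 2 - 1) / 2).toNat else 0) + 1 := by
        split_ifs <;> omega
      rw [hc, List.range_succ_eq_map, List.filterMap_cons, List.filterMap_map]
      have h0 : ((a :: b :: rest)[(2 * ((0:Nat) : Int)).toNat]?) = some a := by norm_num
      rw [h0]
      have hf : ∀ x : Nat, ((fun x : Nat => (a :: b :: rest)[(2 * (x : Int)).toNat]?) ∘ Nat.succ) x
          = rest[(2 * (x : Int)).toNat]? := by
        intro x
        have h2 : (2 * ((x.succ : Nat) : Int)).toNat = (2 * (x : Int)).toNat + 2 := by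
          push_cast; omega
        simp only [Function.comp, h2]
        simp
      rw [List.filterMap_congr (fun x _ => hf x), ih]
      simp [pvEvens]

theorem slice_odd : ∀ (xs : List Char), PySem.List.slice? xs (some 1) none 2 = some (pvOdds xs)
  | [] => by simp [PySem.List.slice?, PySem.List.sliceIndices, pvOdds]
  | [a] => by simp [PySem.List.slice?, PySem.List.sliceIndices, pvOdds]
  | a :: b :: rest => by
      have ih := slice_odd rest
      simp only [PySem.List.slice?, PySem.List.sliceIndices] at ih ⊢
      simp at ih ⊢
      have hc : (((rest.length : Int) + 1 + 1 - min 1 ((rest.length : Int) + 1 + 1) + 2 - 1) / 2).toNat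
          = (if 1 < rest.length then (((rest.length : Int) - min 1 (rest.length : Int) + 2 - 1) / 2).toNat else 0) + 1 := by
        split_ifs <;> omega
      rw [hc, List.range_succ_eq_map, List.filterMap_cons, List.filterMap_map]
      have h0 : ((a :: b :: rest)[(min 1 ((rest.length : Int) + 1 + 1) + 2 * ((0:Nat) : Int)).toNat]?) = some b := by
        have : (min 1 ((rest.length : Int) + 1 + 1) + 2 * ((0:Nat) : Int)).toNat = 1 := by omega
        rw [this]; rfl
      rw [h0]
      have hf : ∀ x : Nat, ((fun x : Nat => (a :: b :: rest)[(min 1 ((rest.length : Int) + 1 + 1) + 2 * (x : Int)).toNat]?) ∘ Nat.succ) x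
          = rest[(min 1 (rest.length : Int) + 2 * (x : Int)).toNat]? := by
        intro x
        cases rest with
        | nil =>
            simp only [Function.comp]
            have h1 : (min 1 (((List.nil (α := Char)).length : Int) + 1 + 1) + 2 * ((x.succ : Nat) : Int)).toNat = 2 * x + 3 := by
              simp; omega
            rw [h1]; simp
        | cons r rs =>
            simp only [Function.comp]
            have h1 : (min 1 (((r :: rs).length : Int) + 1 + 1) + 2 * ((x.succ : Nat) : Int)).toNat
                = (min 1 (((r :: rs).length : Int)) + 2 * (x : Int)).toNat + 2 := by
              simp; omega
            rw [h1]; simp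
      rw [List.filterMap_congr (fun x _ => hf x), ih]
      simp [pvOdds]

theorem odds_cons : ∀ (b : Char) (r : List Char), pvOdds (b :: r) = pvEvens r
  | _, [] => rfl
  | _, [_] => rfl
  | _, x :: y :: r => by simp [pvOdds, pvEvens, odds_cons y r]

theorem evens_cons (c : Char) (r : List Char) : pvEvens (c :: r) = c :: pvOdds r := by
  cases r with
  | nil => rfl
  | cons b rr => simp [pvEvens, odds_cons b rr]

-- the table lookup computes pvF
-- rot is drop-append-take of the (nonneg) Python modulus
lemma rot_eq (s : List Char) (k : Int) (hs : 0 < s.length) :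
    pvRot s k = s.drop (PySem.Int.mod k s.length).toNat ++ s.take (PySem.Int.mod k s.length).toNat := by
  have hpos : (0:Int) < (s.length : Int) := by exact_mod_cast hs
  have hmod : PySem.Int.mod k s.length = k % (s.length : Int) :=
    PySem.Int.mod_eq_emod_of_pos hpos
  have hn : 0 ≤ PySem.Int.mod k s.length := by
    rw [hmod]; exact Int.emod_nonneg k (by omega)
  unfold pvRot
  dsimp only
  rw [PySem.List.slice_from s hn, PySem.List.slice_to s hn]

lemma length_rot (s : List Char) (k : Int) (hs : 0 < s.length) : (pvRot s k).length = s.length := by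
  rw [rot_eq s k hs]; simp
  have hpos : (0:Int) < (s.length : Int) := by exact_mod_cast hs
  have hmod : PySem.Int.mod k s.length = k % (s.length : Int) := PySem.Int.mod_eq_emod_of_pos hpos
  have : 0 ≤ k % (s.length : Int) := Int.emod_nonneg k (by omega)
  have : k % (s.length : Int) < s.length := Int.emod_lt_of_pos k hpos
  omega

lemma rot_getElem? (l : List Char) (m j : Nat) (hm : m ≤ l.length) (hj : j < l.length) :
    (l.drop m ++ l.take m)[j]? = l[(j + m) % l.length]? := by
  rcases lt_or_ge j (l.length - m) with h | h
  · rw [List.getElem?_append_left (by simp; omega)]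
    rw [List.getElem?_drop]
    have he : (j + m) % l.length = m + j := by
      rw [Nat.mod_eq_of_lt (by omega)]; omega
    rw [he]
  · rw [List.getElem?_append_right (by simp; omega)]
    have he : (j + m) % l.length = j - (l.length - m) := by
      rw [Nat.mod_eq_sub_mod (by omega), Nat.mod_eq_of_lt (by omega)]; omega
    simp only [List.length_drop]
    rw [List.getElem?_take_of_lt (by omega), he]

lemma lookup_skip (t1 t2 : List (Char × Char)) (c : Char) (h : ∀ p ∈ t1, p.1 ≠ c) :
    pvLookup (t1 ++ t2) c = pvLookup t2 c := by
  induction t1 with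
  | nil => rfl
  | cons p t ih =>
      obtain ⟨a, b⟩ := p
      have hne : (a == c) = false := beq_eq_false_iff_ne.mpr (h (a, b) (by simp))
      simp only [List.cons_append, pvLookup, hne]
      exact ih (fun q hq => h q (by simp [hq]))

lemma lookup_zip : ∀ (src dst : List Char) (t : List (Char × Char)) (j : Nat) (c : Char),
    src.Nodup → src[j]? = some c → j < dst.length →
    pvLookup (src.zip dst ++ t) c = dst[j]?
  | [], _, _, j, c => by intro _ hj _; simp at hj
  | a :: src', dst, t, j, c => by
      intro hnd hj hd
      cases dst with
      | nil => simp at hd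
      | cons d dst' =>
          cases j with
          | zero =>
              simp at hj
              subst hj
              simp [pvLookup]
          | succ i =>
              simp only [List.getElem?_cons_succ] at hj
              have hmem : c ∈ src' := List.mem_of_getElem? hj
              have hne : (a == c) = false := by
                apply beq_eq_false_iff_ne.mpr
                intro hac
                exact (List.nodup_cons.mp hnd).1 (hac ▸ hmem)
              simp only [List.zip_cons_cons, List.cons_append, pvLookup, hne]
              exact lookup_zip src' dst' t i c (List.nodup_cons.mp hnd).2 hj (by simpa using hd)

lemma lookup_none : ∀ (t : List (Char × Char)) (c : Char), (∀ p ∈ t, p.1 ≠ c) → pvLookup t c = none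
  | [], _ => by intro _; rfl
  | p :: t, c => by
      intro h
      obtain ⟨a, b⟩ := p
      have hne : (a == c) = false := beq_eq_false_iff_ne.mpr (h (a, b) (by simp))
      simp only [pvLookup, hne]
      exact lookup_none t c (fun q hq => h q (by simp [hq]))


lemma digit_at : ∀ j, j < 10 → pvDigits[j]? = some (Char.ofNat (48 + j)) := by decide

lemma upper_at : ∀ j, j < 26 → pvUpper[j]? = some (Char.ofNat (65 + j)) := by decide

lemma lower_at : ∀ j, j < 26 → pvLower[j]? = some (Char.ofNat (97 + j)) := by decide

lemma mod_toNat (k : Int) (L : Nat) (hL : 0 < L) :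
    ((PySem.Int.mod k L).toNat : Int) = k % (L : Int) ∧ (PySem.Int.mod k L).toNat ≤ L := by
  have hpos : (0:Int) < (L : Int) := by exact_mod_cast hL
  have hmod : PySem.Int.mod k L = k % (L : Int) := PySem.Int.mod_eq_emod_of_pos hpos
  have h0 : 0 ≤ k % (L : Int) := Int.emod_nonneg k (by omega)
  have h1 : k % (L : Int) < L := Int.emod_lt_of_pos k hpos
  constructor
  · rw [hmod, Int.toNat_of_nonneg h0]
  · rw [hmod]; omega

lemma transChar_eq (k : Int) (c : Char) : pvTransChar (pvTable k) c = pvF k c := by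
  have hm10 : ((PySem.Int.mod k 10).toNat : Int) = k % 10 ∧ (PySem.Int.mod k 10).toNat ≤ 10 := by
    simpa using mod_toNat k 10 (by norm_num)
  have hm26 : ((PySem.Int.mod k 26).toNat : Int) = k % 26 ∧ (PySem.Int.mod k 26).toNat ≤ 26 := by
    simpa using mod_toNat k 26 (by norm_num)
  have hLd : pvDigits.length = 10 := by decide
  have hLu : pvUpper.length = 26 := by decide
  have hLl : pvLower.length = 26 := by decide
  have hd1 : pvRot pvDigits k = pvDigits.drop (PySem.Int.mod k 10).toNat ++ pvDigits.take (PySem.Int.mod k 10).toNat :=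
    rot_eq pvDigits k (by decide)
  have hd2 : pvRot pvUpper k = pvUpper.drop (PySem.Int.mod k 26).toNat ++ pvUpper.take (PySem.Int.mod k 26).toNat :=
    rot_eq pvUpper k (by decide)
  have hd3 : pvRot pvLower k = pvLower.drop (PySem.Int.mod k 26).toNat ++ pvLower.take (PySem.Int.mod k 26).toNat :=
    rot_eq pvLower k (by decide)
  have hl1 : (pvRot pvDigits k).length = 10 := length_rot pvDigits k (by decide)
  have hl2 : (pvRot pvUpper k).length = 26 := length_rot pvUpper k (by decide)
  have hl3 : (pvRot pvLower k).length = 26 := length_rot pvLower k (by decide)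
  have htab : pvTable k
      = pvDigits.zip (pvRot pvDigits k)
        ++ (pvUpper.zip (pvRot pvUpper k) ++ pvLower.zip (pvRot pvLower k)) := by
    unfold pvTable
    rw [List.zip_append (by simp [hl1, hl2]; decide),
        List.zip_append (by simp [hl1]; decide), List.append_assoc]
  set m10 := (PySem.Int.mod k 10).toNat with hm10d
  set m26 := (PySem.Int.mod k 26).toNat with hm26d
  by_cases hdig : 48 ≤ c.toNat ∧ c.toNat ≤ 57
  · -- digit
    have hj : pvDigits[c.toNat - 48]? = some c := by
      rw [digit_at _ (by omega)]
      congr 1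
      have : 48 + (c.toNat - 48) = c.toNat := by omega
      rw [this, Char.ofNat_toNat]
    have hlk : pvLookup (pvTable k) c = (pvRot pvDigits k)[c.toNat - 48]? := by
      rw [htab]
      exact lookup_zip pvDigits (pvRot pvDigits k) _ (c.toNat - 48) c (by decide) hj (by omega)
    rw [pvTransChar, hlk, hd1, rot_getElem? pvDigits m10 (c.toNat - 48) (by omega) (by omega)]
    rw [hLd, digit_at _ (by omega)]
    simp only [pvF]
    rw [if_pos (by omega)]
    congr 1
    omega
  · by_cases hup : 65 ≤ c.toNat ∧ c.toNat ≤ 90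
    · -- uppercase
      have hj : pvUpper[c.toNat - 65]? = some c := by
        rw [upper_at _ (by omega)]
        congr 1
        have : 65 + (c.toNat - 65) = c.toNat := by omega
        rw [this, Char.ofNat_toNat]
      have hskip : ∀ p ∈ pvDigits.zip (pvRot pvDigits k), p.1 ≠ c := by
        intro p hp heq
        have h1 : p.1 ∈ pvDigits := (List.of_mem_zip hp).1
        have h2 : ∀ x ∈ pvDigits, x.toNat ≤ 57 := by
          have h : pvDigits.all (fun x => decide (x.toNat ≤ 57)) = true := rfl
          intro x hx; simpa using List.all_eq_true.mp h x hx
        have := h2 p.1 h1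
        rw [heq] at this
        omega
      have hlk : pvLookup (pvTable k) c = (pvRot pvUpper k)[c.toNat - 65]? := by
        rw [htab, lookup_skip _ _ _ hskip]
        exact lookup_zip pvUpper (pvRot pvUpper k) _ (c.toNat - 65) c (by decide) hj (by omega)
      rw [pvTransChar, hlk, hd2, rot_getElem? pvUpper m26 (c.toNat - 65) (by omega) (by omega)]
      rw [hLu, upper_at _ (by omega)]
      simp only [pvF]
      rw [if_neg (by omega), if_pos (by omega)]
      congr 1
      omega
    · by_cases hlo : 97 ≤ c.toNat ∧ c.toNat ≤ 122
      · -- lowercase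
        have hj : pvLower[c.toNat - 97]? = some c := by
          rw [lower_at _ (by omega)]
          congr 1
          have : 97 + (c.toNat - 97) = c.toNat := by omega
          rw [this, Char.ofNat_toNat]
        have hskip1 : ∀ p ∈ pvDigits.zip (pvRot pvDigits k), p.1 ≠ c := by
          intro p hp heq
          have h1 : p.1 ∈ pvDigits := (List.of_mem_zip hp).1
          have h2 : ∀ x ∈ pvDigits, x.toNat ≤ 57 := by
            have h : pvDigits.all (fun x => decide (x.toNat ≤ 57)) = true := rfl
            intro x hx; simpa using List.all_eq_true.mp h x hx
          have := h2 p.1 h1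
          rw [heq] at this
          omega
        have hskip2 : ∀ p ∈ pvUpper.zip (pvRot pvUpper k), p.1 ≠ c := by
          intro p hp heq
          have h1 : p.1 ∈ pvUpper := (List.of_mem_zip hp).1
          have h2 : ∀ x ∈ pvUpper, x.toNat ≤ 90 := by
            have h : pvUpper.all (fun x => decide (x.toNat ≤ 90)) = true := rfl
            intro x hx; simpa using List.all_eq_true.mp h x hx
          have := h2 p.1 h1
          rw [heq] at this
          omega
        have hlk : pvLookup (pvTable k) c = (pvRot pvLower k)[c.toNat - 97]? := by
          rw [htab, lookup_skip _ _ _ hskip1, lookup_skip _ _ _ hskip2]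
          have := lookup_zip pvLower (pvRot pvLower k) [] (c.toNat - 97) c (by decide) hj (by omega)
          simpa using this
        rw [pvTransChar, hlk, hd3, rot_getElem? pvLower m26 (c.toNat - 97) (by omega) (by omega)]
        rw [hLl, lower_at _ (by omega)]
        simp only [pvF]
        rw [if_neg (by omega), if_neg (by omega), if_pos (by omega)]
        congr 1
        omega
      · -- untouched characters
        have hnone : pvLookup (pvTable k) c = none := by
          apply lookup_none
          intro p hp heq
          have hmem : p.1 ∈ pvDigits ++ pvUpper ++ pvLower := by
            have := (List.of_mem_zip (by simpa [pvTable] using hp : p ∈ (pvDigits ++ pvUpper ++ pvLower).zip _)).1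
            exact this
          have hr : ∀ x ∈ pvDigits ++ pvUpper ++ pvLower,
              (48 ≤ x.toNat ∧ x.toNat ≤ 57) ∨ (65 ≤ x.toNat ∧ x.toNat ≤ 90) ∨ (97 ≤ x.toNat ∧ x.toNat ≤ 122) := by
            have h : (pvDigits ++ pvUpper ++ pvLower).all
                (fun x => decide ((48 ≤ x.toNat ∧ x.toNat ≤ 57) ∨ (65 ≤ x.toNat ∧ x.toNat ≤ 90) ∨ (97 ≤ x.toNat ∧ x.toNat ≤ 122))) = true := rfl
            intro x hx; simpa using List.all_eq_true.mp h x hx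
          have := hr p.1 hmem
          rw [heq] at this
          omega
        rw [pvTransChar, hnone]
        simp only [pvF]
        rw [if_neg (by omega), if_neg (by omega), if_neg (by omega)]

-- parity-keyed map over enumerate = interleave of the two strided maps
lemma map_enum_interleave (k1 k2 : Int) :
    ∀ (l : List Char) (s : Int),
      ((PySem.List.enumerate l s).map (fun ic => pvF (if ic.1 % 2 == 0 then k1 else k2) ic.2))
        = pvInterleave ((pvEvens l).map (pvF (if s % 2 == 0 then k1 else k2)))
            ((pvOdds l).map (pvF (if (s + 1) % 2 == 0 then k1 else k2))) := by
  intro l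
  induction l with
  | nil => intro s; simp [PySem.List.enumerate_nil, pvEvens, pvOdds, pvInterleave]
  | cons c rest ih =>
      intro s
      rw [PySem.List.enumerate_cons]
      rw [evens_cons, odds_cons]
      simp only [List.map_cons]
      rw [ih (s + 1)]
      have h2 : (s + 1 + 1) % 2 = s % 2 := by omega
      simp only [pvInterleave, h2]

-- ===== VERDICT (by name: the statement is the Claim_ definition above) =====
theorem encryptCaesarCipher_spec : Claim_equal_encryptCaesarCipher := by
  intro text key1 key2 _
  unfold Spec_encryptCaesarCipher encryptCaesarCipher encryptCaesarCipher_alt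
  rw [foldl_singleton _ (fun ic => pvF (if ic.1 % 2 == 0 then key1 else key2) ic.2)]
  · rw [slice_even, slice_odd]
    simp only [Option.getD_some, pvTranslate]
    rw [map_enum_interleave key1 key2 text.toList 0]
    norm_num
    have e1 : List.map (pvTransChar (pvTable key1)) (pvEvens text.toList)
        = List.map (pvF key1) (pvEvens text.toList) :=
      List.map_congr_left (fun c _ => transChar_eq key1 c)
    have e2 : List.map (pvTransChar (pvTable key2)) (pvOdds text.toList)
        = List.map (pvF key2) (pvOdds text.toList) :=
      List.map_congr_left (fun c _ => transChar_eq key2 c)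
    rw [e1, e2]
  · intro s ic
    by_cases h : ic.1 % 2 == 0
    · simp only [h, if_pos]; exact stepA_eq key1 ic.2 s
    · simp only [h, if_neg, Bool.false_eq_true, not_false_eq_true]; exact stepA_eq key2 ic.2 s
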